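-- pv_equiv track=rewrite | github.com/cyphou/Tableau-To-PowerBI | powerbi_import/m_validator.py | _strip_strings_and_comments
-- ===== SOURCE A (Python) =====
-- def _strip_strings_and_comments(text: str) -> str:
--     """Replace string literals, comments, and quoted identifiers with
--     placeholders so that subsequent character-level checks (bracket
--     counting, keyword search) ignore their contents.
--
--     Preserves length and line breaks so that any error positions are
--     meaningful.
--     """
--     out = []
--     i = 0
--     n = len(text)
--     while i < n:
--         ch = text[i]
--         # Quoted identifier #"..."  — has the same escaping as a string
--         if ch == '#' and i + 1 < n and text[i + 1] == '"':
--             j = i + 2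
--             while j < n:
--                 if text[j] == '"':
--                     if j + 1 < n and text[j + 1] == '"':
--                         j += 2  # escaped quote
--                         continue
--                     j += 1
--                     break
--                 j += 1
--             out.append(' ' * (j - i))
--             i = j
--             continue
--         # Plain string "..."
--         if ch == '"':
--             j = i + 1
--             while j < n:
--                 if text[j] == '"':
--                     if j + 1 < n and text[j + 1] == '"':
--                         j += 2
--                         continue
--                     j += 1
--                     break
--                 j += 1
--             out.append(' ' * (j - i))
--             i = j
--             continue
--         # Line comment // ... \n
--         if ch == '/' and i + 1 < n and text[i + 1] == '/':
--             j = text.find('\n', i)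
--             if j == -1:
--                 j = n
--             out.append(' ' * (j - i))
--             i = j
--             continue
--         # Block comment /* ... */
--         if ch == '/' and i + 1 < n and text[i + 1] == '*':
--             j = text.find('*/', i + 2)
--             if j == -1:
--                 j = n
--             else:
--                 j += 2
--             # Preserve newlines for line-number accuracy
--             block = text[i:j]
--             out.append(''.join('\n' if c == '\n' else ' ' for c in block))
--             i = j
--             continue
--         out.append(ch)
--         i += 1
--     return ''.join(out)
-- ===== SOURCE B (Python) =====
-- def _strip_strings_and_comments(text: str) -> str:
--     # Single-pass Mealy state machine (no lookahead, no inner scans); same output as A.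
--     NORMAL, HASH, SLASH, STR, STR_Q, LINE, BLOCK, BLOCK_STAR = range(8)
--
--     def normal(ch):
--         if ch == '#':
--             return '', HASH
--         if ch == '"':
--             return ' ', STR
--         if ch == '/':
--             return '', SLASH
--         return ch, NORMAL
--
--     out = []
--     state = NORMAL
--     for ch in text:
--         if state == NORMAL:
--             emit, state = normal(ch)
--         elif state == HASH:
--             if ch == '"':
--                 emit, state = '  ', STR
--             else:
--                 e2, state = normal(ch)
--                 emit = '#' + e2
--         elif state == SLASH:
--             if ch == '/':
--                 emit, state = '  ', LINE
--             elif ch == '*':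
--                 emit, state = '  ', BLOCK
--             else:
--                 e2, state = normal(ch)
--                 emit = '/' + e2
--         elif state == STR:
--             emit = ' '
--             if ch == '"':
--                 state = STR_Q
--         elif state == STR_Q:
--             if ch == '"':
--                 emit, state = ' ', STR
--             else:
--                 emit, state = normal(ch)
--         elif state == LINE:
--             if ch == '\n':
--                 emit, state = '\n', NORMAL
--             else:
--                 emit = ' '
--         elif state == BLOCK:
--             if ch == '*':
--                 emit, state = ' ', BLOCK_STAR
--             elif ch == '\n':
--                 emit = '\n'
--             else:
--                 emit = ' '
--         else:  # BLOCK_STAR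
--             if ch == '/':
--                 emit, state = ' ', NORMAL
--             elif ch == '*':
--                 emit = ' '
--             elif ch == '\n':
--                 emit, state = '\n', BLOCK
--             else:
--                 emit, state = ' ', BLOCK
--         out.append(emit)
--     if state == HASH:
--         out.append('#')
--     elif state == SLASH:
--         out.append('/')
--     return ''.join(out)
-- ===== Notes on version B (the rewrite author's own statement) =====
-- stated objective: alternative
-- what changed: Replaced A's index-based while loop with per-token inner look-ahead scans (and str.find calls) by a single left-to-right pass over the characters driven by an explicit 8-state Mealy machine (normal/hash/slash/string/string-quote/line-comment/block-comment/block-star) with no lookahead.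
import Mathlib
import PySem

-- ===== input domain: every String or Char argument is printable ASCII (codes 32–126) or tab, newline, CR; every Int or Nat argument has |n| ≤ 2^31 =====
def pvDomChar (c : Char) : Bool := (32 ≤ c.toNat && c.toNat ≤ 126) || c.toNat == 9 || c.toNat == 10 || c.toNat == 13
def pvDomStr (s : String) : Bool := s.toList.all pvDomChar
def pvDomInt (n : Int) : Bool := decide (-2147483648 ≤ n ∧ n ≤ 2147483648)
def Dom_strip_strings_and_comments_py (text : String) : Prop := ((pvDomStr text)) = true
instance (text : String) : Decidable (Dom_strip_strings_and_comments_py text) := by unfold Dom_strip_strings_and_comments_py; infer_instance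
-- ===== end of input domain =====

-- B replaces A's index loop with inner look-ahead scans by a single-pass character state machine (alternative decomposition, same O(n) cost).

-- ===== PORT A =====
-- inner while loop of the string/quoted-identifier cases: number of chars consumed after the opening quote
def pvScanStr : List Char → Nat
  | [] => 0
  | '"' :: '"' :: rest => 2 + pvScanStr rest
  | '"' :: _ => 1
  | _ :: rest => 1 + pvScanStr rest

-- text.find('\n', i): chars until (excluding) the next newline, or to end
def pvScanLine : List Char → Nat
  | [] => 0
  | '\n' :: _ => 0
  | _ :: rest => 1 + pvScanLine rest

-- text.find('*/', i+2): chars consumed from i+2, including a closing */ if found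
def pvScanBlock : List Char → Nat
  | '*' :: '/' :: _ => 2
  | [] => 0
  | _ :: rest => 1 + pvScanBlock rest

def pvBlank (c : Char) : Char := if c = '\n' then '\n' else ' '

def pvLoopA : List Char → List Char
  | '#' :: '"' :: rest =>
      let k := pvScanStr rest
      List.replicate (2 + k) ' ' ++ pvLoopA (rest.drop k)
  | '"' :: rest =>
      let k := pvScanStr rest
      List.replicate (1 + k) ' ' ++ pvLoopA (rest.drop k)
  | '/' :: '/' :: rest =>
      let k := pvScanLine rest
      List.replicate (2 + k) ' ' ++ pvLoopA (rest.drop k)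
  | '/' :: '*' :: rest =>
      let k := pvScanBlock rest
      (' ' :: ' ' :: (rest.take k).map pvBlank) ++ pvLoopA (rest.drop k)
  | c :: rest => c :: pvLoopA rest
  | [] => []
termination_by l => l.length
decreasing_by all_goals (simp; try omega)

def strip_strings_and_comments_py (text : String) : String := String.ofList (pvLoopA text.toList)

-- ===== PORT B =====
inductive PvSt | normal | hash | slash | str | strq | line | block | blockStar
deriving DecidableEq, Repr

-- transition: emitted chars and next state (Source B's `normal` helper and the elif chain)
def pvNormStep (c : Char) : List Char × PvSt :=
  if c = '#' then ([], .hash)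
  else if c = '"' then ([' '], .str)
  else if c = '/' then ([], .slash)
  else ([c], .normal)

def pvTrans : PvSt → Char → List Char × PvSt
  | .normal, c => pvNormStep c
  | .hash, c =>
      if c = '"' then ([' ', ' '], .str)
      else let (e, s) := pvNormStep c; ('#' :: e, s)
  | .slash, c =>
      if c = '/' then ([' ', ' '], .line)
      else if c = '*' then ([' ', ' '], .block)
      else let (e, s) := pvNormStep c; ('/' :: e, s)
  | .str, c => ([' '], if c = '"' then .strq else .str)
  | .strq, c =>
      if c = '"' then ([' '], .str) else pvNormStep c
  | .line, c =>
      if c = '\n' then (['\n'], .normal) else ([' '], .line)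
  | .block, c =>
      if c = '*' then ([' '], .blockStar)
      else if c = '\n' then (['\n'], .block)
      else ([' '], .block)
  | .blockStar, c =>
      if c = '/' then ([' '], .normal)
      else if c = '*' then ([' '], .blockStar)
      else if c = '\n' then (['\n'], .block)
      else ([' '], .block)

-- pending char flushed at end of input (Source B's trailing ifs)
def pvFlush : PvSt → List Char
  | .hash => ['#']
  | .slash => ['/']
  | _ => []

def strip_strings_and_comments_py_alt (text : String) : String :=
  let p := text.toList.foldl (fun (p : PvSt × List Char) c =>
    let (e, s) := pvTrans p.1 c; (s, p.2 ++ e)) (.normal, [])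
  String.ofList (p.2 ++ pvFlush p.1)

-- ===== PRECONDITION & SPEC =====
def Spec_strip_strings_and_comments_py (text : String) (out : String) : Prop := out = strip_strings_and_comments_py_alt text
instance (text : String) (out : String) : Decidable (Spec_strip_strings_and_comments_py text out) := by unfold Spec_strip_strings_and_comments_py; infer_instance

-- ===== CLAIM (what is proved, stated in full; the proofs are below) =====
def Claim_equal_strip_strings_and_comments_py : Prop := ∀ (text : String), Dom_strip_strings_and_comments_py text → Spec_strip_strings_and_comments_py text (strip_strings_and_comments_py text)

-- ===== LEMMAS AND PROOFS =====
-- the machine run including the final flush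
def pvRunB (st : PvSt) : List Char → List Char
  | [] => pvFlush st
  | c :: rest => let (e, s) := pvTrans st c; e ++ pvRunB s rest

theorem pvFoldl_runB (l : List Char) (st : PvSt) (acc : List Char) :
    (l.foldl (fun (p : PvSt × List Char) c =>
       let (e, s) := pvTrans p.1 c; (s, p.2 ++ e)) (st, acc)).2 ++
      pvFlush (l.foldl (fun (p : PvSt × List Char) c =>
       let (e, s) := pvTrans p.1 c; (s, p.2 ++ e)) (st, acc)).1 = acc ++ pvRunB st l := by
  induction l generalizing st acc with
  | nil => simp [pvRunB]
  | cons c rest ih =>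
      simp only [List.foldl_cons, pvRunB]
      rw [ih]
      simp

theorem pvRunB_str (l : List Char) :
    pvRunB .str l = List.replicate (pvScanStr l) ' ' ++ pvRunB .normal (l.drop (pvScanStr l)) := by
  fun_induction pvScanStr l with
  | case1 => simp [pvRunB, pvFlush]
  | case2 rest ih =>
      simp [pvRunB, pvTrans, List.replicate_succ, Nat.add_comm 2, ih]
  | case3 tail h =>
      cases tail with
      | nil => simp [pvRunB, pvTrans, pvFlush]
      | cons c r =>
          have hc : ¬ c = '\"' := fun e => h r (by rw [e])
          simp [pvRunB, pvTrans, hc]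
  | case4 c rest h hne ih =>
      have hc : ¬ c = '\"' := hne
      simp [pvRunB, pvTrans, hc, List.replicate_succ, Nat.add_comm 1, ih]

theorem pvRunB_line (l : List Char) :
    pvRunB .line l = List.replicate (pvScanLine l) ' ' ++ pvRunB .normal (l.drop (pvScanLine l)) := by
  fun_induction pvScanLine l with
  | case1 => simp [pvRunB, pvFlush]
  | case2 rest => simp [pvRunB, pvTrans, pvNormStep]
  | case3 c rest h ih =>
      have h' : ¬ c = '\n' := h
      simp [pvRunB, pvTrans, h', List.replicate_succ, Nat.add_comm 1, ih]

theorem pvRunB_blockStar_eq (l : List Char) (h : ∀ r, l ≠ '/' :: r) :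
    pvRunB .blockStar l = pvRunB .block l := by
  cases l with
  | nil => rfl
  | cons c r =>
      have hc : ¬ c = '/' := fun e => h r (by rw [e])
      by_cases h1 : c = '*' <;> by_cases h2 : c = '\n' <;>
        simp_all [pvRunB, pvTrans]

theorem pvRunB_block (l : List Char) :
    pvRunB .block l = (l.take (pvScanBlock l)).map pvBlank ++ pvRunB .normal (l.drop (pvScanBlock l)) := by
  fun_induction pvScanBlock l with
  | case1 rest => simp [pvRunB, pvTrans, pvBlank]
  | case2 => simp [pvRunB, pvFlush]
  | case3 c rest h ih =>
      by_cases hs : c = '*'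
      · subst hs
        have hr : ∀ r, rest ≠ '/' :: r := fun r e => h r rfl e
        simp [pvRunB, pvTrans, pvRunB_blockStar_eq rest hr, ih, Nat.add_comm 1, pvBlank]
      · by_cases hn : c = '\n' <;>
          simp [pvRunB, pvTrans, hs, hn, ih, Nat.add_comm 1, pvBlank]

theorem pvLoopA_runB (l : List Char) : pvLoopA l = pvRunB .normal l := by
  fun_induction pvLoopA l with
  | case1 rest k ih =>
      simp [pvRunB, pvTrans, pvNormStep, pvRunB_str, ih, Nat.add_comm 2, List.replicate_succ]
      rfl
  | case2 rest k ih =>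
      simp [pvRunB, pvTrans, pvNormStep, pvRunB_str, ih, Nat.add_comm 1, List.replicate_succ]
      rfl
  | case3 rest k ih =>
      simp [pvRunB, pvTrans, pvNormStep, pvRunB_line, ih, Nat.add_comm 2, List.replicate_succ]
      rfl
  | case4 rest k ih =>
      simp [pvRunB, pvTrans, pvNormStep, pvRunB_block, ih]
      rfl
  | case5 c rest h1 h2 h3 h4 ih =>
      by_cases hh : c = '#'
      · subst hh
        cases rest with
        | nil => simp [pvRunB, pvTrans, pvNormStep, pvFlush, pvLoopA]
        | cons c' r =>
            have hq' : ¬ c' = '\"' := fun e => h1 r rfl (by rw [e])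
            simp [pvRunB, pvTrans, pvNormStep, hq', ih]
      · by_cases hq : c = '\"'
        · exact absurd hq h2
        · by_cases hs : c = '/'
          · subst hs
            cases rest with
            | nil => simp [pvRunB, pvTrans, pvNormStep, pvFlush, pvLoopA]
            | cons c' r =>
                have hA : ¬ c' = '/' := fun e => h3 r rfl (by rw [e])
                have hB : ¬ c' = '*' := fun e => h4 r rfl (by rw [e])
                simp [pvRunB, pvTrans, pvNormStep, hA, hB, ih]
          · simp [pvRunB, pvTrans, pvNormStep, hh, hq, hs, ih]
  | case6 => rfl

-- ===== VERDICT (by name: the statement is the Claim_ definition above) =====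
theorem strip_strings_and_comments_py_spec : Claim_equal_strip_strings_and_comments_py := by
  intro text _
  simp only [Spec_strip_strings_and_comments_py, strip_strings_and_comments_py,
    strip_strings_and_comments_py_alt]
  rw [pvFoldl_runB, pvLoopA_runB]
  simp
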